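-- pv_equiv track=rewrite | github.com/aeronjl/behavtaskatlas | src/behavtaskatlas/static_site.py | _combined_report_status
-- ===== SOURCE A (Python) =====
-- from typing import Any
--
-- def _combined_report_status(slice_payloads: list[dict[str, Any]]) -> str:
--     if not slice_payloads:
--         return "no slice"
--     if any(payload.get("report_status") == "available" for payload in slice_payloads):
--         return "available"
--     if any(payload.get("artifact_status") == "available" for payload in slice_payloads):
--         return "report pending"
--     return "analysis pending"
-- ===== SOURCE B (Python) =====
-- def _combined_report_status(slice_payloads):
--     if not slice_payloads:
--         return "no slice"
--     saw_artifact = False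
--     for payload in slice_payloads:
--         if payload.get("report_status") == "available":
--             return "available"
--         if payload.get("artifact_status") == "available":
--             saw_artifact = True
--     return "report pending" if saw_artifact else "analysis pending"
-- ===== Notes on version B (the rewrite author's own statement) =====
-- stated objective: alternative
-- what changed: Replaced the two separate any() scans by a single loop that returns 'available' immediately and tracks artifact availability in one boolean.
import Mathlib
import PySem

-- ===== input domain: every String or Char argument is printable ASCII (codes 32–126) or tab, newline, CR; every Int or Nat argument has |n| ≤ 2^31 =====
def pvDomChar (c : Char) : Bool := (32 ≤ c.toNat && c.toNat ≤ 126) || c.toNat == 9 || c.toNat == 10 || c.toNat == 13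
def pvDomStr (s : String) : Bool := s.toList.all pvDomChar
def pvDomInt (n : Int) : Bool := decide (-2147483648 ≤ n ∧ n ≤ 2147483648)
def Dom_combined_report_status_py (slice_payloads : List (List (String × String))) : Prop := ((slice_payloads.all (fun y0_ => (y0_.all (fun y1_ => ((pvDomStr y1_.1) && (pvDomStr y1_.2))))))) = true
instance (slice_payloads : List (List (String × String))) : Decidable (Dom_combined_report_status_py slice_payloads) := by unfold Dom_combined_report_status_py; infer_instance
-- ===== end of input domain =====

-- B fuses A's two any() scans into one pass with a saw_artifact flag (alternative decomposition, same cost).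

-- ===== PORT A =====
def combined_report_status_py (slice_payloads : List (List (String × String))) : String :=
  if slice_payloads.isEmpty then "no slice"
  else if slice_payloads.any (fun payload => (PySem.Dict.mk payload).get? "report_status" == some "available") then "available"
  else if slice_payloads.any (fun payload => (PySem.Dict.mk payload).get? "artifact_status" == some "available") then "report pending"
  else "analysis pending"

-- ===== PORT B =====
-- the single loop of Source B: early return on report_status, otherwise accumulate saw_artifact
def combined_report_status_py_alt_loop (rest : List (List (String × String))) (saw_artifact : Bool) : String :=
  match rest with
  | [] => if saw_artifact then "report pending" else "analysis pending"
  | payload :: rest' =>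
    if (PySem.Dict.mk payload).get? "report_status" == some "available" then "available"
    else combined_report_status_py_alt_loop rest'
      (if (PySem.Dict.mk payload).get? "artifact_status" == some "available" then true else saw_artifact)

def combined_report_status_py_alt (slice_payloads : List (List (String × String))) : String :=
  if slice_payloads.isEmpty then "no slice"
  else combined_report_status_py_alt_loop slice_payloads false

-- ===== PRECONDITION & SPEC =====
def Spec_combined_report_status_py (slice_payloads : List (List (String × String))) (out : String) : Prop := out = combined_report_status_py_alt slice_payloads
instance (slice_payloads : List (List (String × String))) (out : String) : Decidable (Spec_combined_report_status_py slice_payloads out) := by unfold Spec_combined_report_status_py; infer_instance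

-- ===== CLAIM (what is proved, stated in full; the proofs are below) =====
def Claim_equal_combined_report_status_py : Prop := ∀ (slice_payloads : List (List (String × String))), Dom_combined_report_status_py slice_payloads → Spec_combined_report_status_py slice_payloads (combined_report_status_py slice_payloads)

-- ===== LEMMAS AND PROOFS =====

-- the loop's result characterised by the two any-scans and the incoming flag
theorem alt_loop_eq (rest : List (List (String × String))) (saw : Bool) :
    combined_report_status_py_alt_loop rest saw =
    (if rest.any (fun payload => (PySem.Dict.mk payload).get? "report_status" == some "available") then "available"
     else if saw || rest.any (fun payload => (PySem.Dict.mk payload).get? "artifact_status" == some "available") then "report pending"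
     else "analysis pending") := by
  induction rest generalizing saw with
  | nil => cases saw <;> simp [combined_report_status_py_alt_loop]
  | cons p rest' ih =>
    simp only [combined_report_status_py_alt_loop, List.any_cons]
    by_cases h : (PySem.Dict.mk p).get? "report_status" == some "available" <;>
      by_cases h2 : (PySem.Dict.mk p).get? "artifact_status" == some "available" <;>
        simp [h, h2, ih]

-- ===== VERDICT (by name: the statement is the Claim_ definition above) =====
theorem combined_report_status_py_spec : Claim_equal_combined_report_status_py := by
  intro xs _
  unfold Spec_combined_report_status_py combined_report_status_py combined_report_status_py_alt
  by_cases he : xs.isEmpty <;> simp [he, alt_loop_eq]
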